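-- pv_equiv track=rewrite | github.com/MrBrantCode/unitest_baseline | mut_generate/mist_train_cf/cf_94270/solution.py | create_histogram
-- ===== SOURCE A (Python) =====
-- def create_histogram(nums):
--     histogram = {}
--
--     for i in range(len(nums)):
--         for j in range(i+1, len(nums)):
--             pair = (nums[i], nums[j])
--
--             if pair in histogram:
--                 histogram[pair] += 1
--             else:
--                 histogram[pair] = 1
--
--     return histogram
-- ===== SOURCE B (Python) =====
-- def create_histogram(nums):
--     n = len(nums)
--     first = {}
--     for idx in range(n):
--         if nums[idx] not in first:
--             first[nums[idx]] = idx
--     histogram = {}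
--     for a, i0 in first.items():
--         cnt = 1
--         for j in range(i0 + 1, n):
--             b = nums[j]
--             key = (a, b)
--             histogram[key] = histogram.get(key, 0) + cnt
--             if b == a:
--                 cnt += 1
--     return histogram
-- ===== Notes on version B (the rewrite author's own statement) =====
-- stated objective: alternative
-- what changed: Instead of iterating over all index pairs (i,j) with i<j, B does one scan per DISTINCT value starting at its first occurrence, adding the running multiplicity of that value as the weight, so all rows with the same left value collapse into one pass (O(n*D) dict operations instead of O(n^2); on distinct-heavy inputs D is about n and the measured cost is the same).
import Mathlib
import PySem

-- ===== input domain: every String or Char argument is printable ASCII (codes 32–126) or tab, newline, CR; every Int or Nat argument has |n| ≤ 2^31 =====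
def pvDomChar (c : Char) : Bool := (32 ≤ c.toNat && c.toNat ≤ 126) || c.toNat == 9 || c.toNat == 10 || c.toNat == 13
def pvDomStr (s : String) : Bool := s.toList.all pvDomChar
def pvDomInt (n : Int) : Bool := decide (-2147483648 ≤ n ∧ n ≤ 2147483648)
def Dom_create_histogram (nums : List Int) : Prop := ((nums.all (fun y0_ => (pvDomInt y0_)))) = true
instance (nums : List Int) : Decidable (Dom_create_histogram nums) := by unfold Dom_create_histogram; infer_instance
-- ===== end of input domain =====

-- B replaces A's loop over all index pairs (i,j), i<j, by one scan per DISTINCT value (started at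
-- its first occurrence) that adds the running multiplicity of that value as a weight (alternative
-- algorithm: O(n*D) dict operations for D distinct values, same measured cost on distinct-heavy inputs).

-- ===== PORT A =====
def create_histogram (nums : List Int) : List (Int × Int × Int) :=
  let n : Int := PySem.List.len nums
  let hist : PySem.Dict (Int × Int) Int :=
    (PySem.List.pyRange 0 n 1).foldl (fun h i =>
      (PySem.List.pyRange (i + 1) n 1).foldl (fun h j =>
        let pair := (PySem.List.pyGetD nums i 0, PySem.List.pyGetD nums j 0)
        if h.contains pair then h.insert pair (h.getD pair 0 + 1)
        else h.insert pair 1) h) PySem.Dict.empty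
  hist.items.map (fun p => (p.1.1, p.1.2, p.2))

-- ===== PORT B =====
def create_histogram_alt (nums : List Int) : List (Int × Int × Int) :=
  let n : Int := PySem.List.len nums
  let first : PySem.Dict Int Int :=
    (PySem.List.pyRange 0 n 1).foldl (fun f idx =>
      if f.contains (PySem.List.pyGetD nums idx 0) then f
      else f.insert (PySem.List.pyGetD nums idx 0) idx) PySem.Dict.empty
  let hist : PySem.Dict (Int × Int) Int :=
    first.items.foldl (fun h p =>
      ((PySem.List.pyRange (p.2 + 1) n 1).foldl
        (fun (s : PySem.Dict (Int × Int) Int × Int) j =>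
          let b := PySem.List.pyGetD nums j 0
          let key := (p.1, b)
          (s.1.insert key (s.1.getD key 0 + s.2), if b == p.1 then s.2 + 1 else s.2))
        (h, 1)).1) PySem.Dict.empty
  hist.items.map (fun p => (p.1.1, p.1.2, p.2))

-- ===== PRECONDITION & SPEC =====
def Spec_create_histogram (nums : List Int) (out : List (Int × Int × Int)) : Prop := out = create_histogram_alt nums
instance (nums : List Int) (out : List (Int × Int × Int)) : Decidable (Spec_create_histogram nums out) := by unfold Spec_create_histogram; infer_instance

-- ===== CLAIM (what is proved, stated in full; the proofs are below) =====
def Claim_equal_create_histogram : Prop := ∀ (nums : List Int), Dom_create_histogram nums → Spec_create_histogram nums (create_histogram nums)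

-- ===== LEMMAS AND PROOFS =====

-- weighted counter step: d[k] = d.get(k, 0) + w
def pvAdd (h : PySem.Dict (Int × Int) Int) (p : (Int × Int) × Int) : PySem.Dict (Int × Int) Int :=
  h.insert p.1 (h.getD p.1 0 + p.2)

-- all ordered pairs (nums[i], nums[j]) with i < j, in A's (i, j)-lexicographic order
def pvPairs : List Int → List (Int × Int)
  | [] => []
  | a :: t => t.map (fun b => (a, b)) ++ pvPairs t

-- B's weighted row for left value a with running multiplicity c
def pvWRow (a c : Int) : List Int → List ((Int × Int) × Int)
  | [] => []
  | b :: t => ((a, b), c) :: pvWRow a (if b == a then c + 1 else c) t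

-- B's whole weighted stream, one row per first occurrence
def pvGwk (seen : List Int) : List Int → List ((Int × Int) × Int)
  | [] => []
  | a :: t => (if a ∈ seen then [] else pvWRow a 1 t) ++ pvGwk (a :: seen) t

-- the `first` dict's items: (value, index) at each first occurrence
def pvFirsts (seen : List Int) (m : Nat) : List Int → List (Int × Int)
  | [] => []
  | a :: t => if a ∈ seen then pvFirsts seen (m + 1) t else (a, (m : Int)) :: pvFirsts (a :: seen) (m + 1) t

def pvWsum (k : Int × Int) (S : List ((Int × Int) × Int)) : Int :=
  ((S.filter (fun p => p.1 == k)).map (·.2)).sum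

def pvPcount (a b : Int) (l : List Int) : Int := ((pvPairs l).count (a, b) : Int)


theorem pv_wsum_nil (k : Int × Int) : pvWsum k [] = 0 := rfl

theorem pv_wsum_cons (k : Int × Int) (p : (Int × Int) × Int) (S : List ((Int × Int) × Int)) :
    pvWsum k (p :: S) = (if p.1 == k then p.2 else 0) + pvWsum k S := by
  by_cases h : p.1 == k <;> simp [pvWsum, List.filter_cons, h]

theorem pv_wsum_append (k : Int × Int) (S T : List ((Int × Int) × Int)) :
    pvWsum k (S ++ T) = pvWsum k S + pvWsum k T := by
  simp [pvWsum]

theorem pv_getD_fold (S : List ((Int × Int) × Int)) (h : PySem.Dict (Int × Int) Int) (k : Int × Int) :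
    (S.foldl pvAdd h).getD k 0 = h.getD k 0 + pvWsum k S := by
  induction S generalizing h with
  | nil => simp [pvWsum]
  | cons p S ih =>
    rw [List.foldl_cons, ih, pv_wsum_cons]
    rw [show pvAdd h p = h.insert p.1 (h.getD p.1 0 + p.2) from rfl]
    rw [PySem.Dict.getD_insert]
    by_cases hk : k = p.1
    · subst hk; simp; ring
    · have : (p.1 == k) = false := by simp [Ne.symm hk]
      simp [hk, this]

theorem pv_keys_fold (S : List ((Int × Int) × Int)) (h : PySem.Dict (Int × Int) Int) :
    (S.foldl pvAdd h).keys = PySem.Set.update h.keys (S.map (·.1)) :=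
  PySem.Dict.keys_foldl_insert_key S Prod.fst (fun d x => d.getD x.1 0 + x.2) h

theorem pv_nodup_fold (S : List ((Int × Int) × Int)) (h : PySem.Dict (Int × Int) Int)
    (hn : h.keys.Nodup) : (S.foldl pvAdd h).keys.Nodup :=
  PySem.Dict.nodup_keys_foldl_insert_key S Prod.fst (fun d x => d.getD x.1 0 + x.2) h hn

theorem pv_update_of_subset (xs : List (Int × Int)) (s : PySem.Set (Int × Int))
    (h : ∀ x ∈ xs, x ∈ s) : PySem.Set.update s xs = s := by
  induction xs generalizing s with
  | nil => rfl
  | cons x xs ih =>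
    rw [PySem.Set.update_cons, PySem.Set.add_of_mem (h x (by simp))]
    exact ih s (fun y hy => h y (by simp [hy]))

theorem pv_map_fst_wrow (t : List Int) (a c : Int) :
    (pvWRow a c t).map (·.1) = t.map (fun b => (a, b)) := by
  induction t generalizing c with
  | nil => rfl
  | cons b t ih => simp [pvWRow, ih]

theorem pv_keys_gen (l : List Int) : ∀ (seen : List Int) (s : PySem.Set (Int × Int)),
    (∀ v ∈ seen, ∀ b ∈ l, (v, b) ∈ s) →
    PySem.Set.update s (pvPairs l) = PySem.Set.update s ((pvGwk seen l).map (·.1)) := by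
  induction l with
  | nil => intro seen s _; rfl
  | cons a t ih =>
    intro seen s inv
    rw [show pvPairs (a :: t) = t.map (fun b => (a, b)) ++ pvPairs t from rfl]
    rw [show pvGwk seen (a :: t) = (if a ∈ seen then [] else pvWRow a 1 t) ++ pvGwk (a :: seen) t from rfl]
    by_cases ha : a ∈ seen
    · rw [if_pos ha, List.nil_append, PySem.Set.update_append]
      have hsub : PySem.Set.update s (t.map (fun b => (a, b))) = s := by
        apply pv_update_of_subset
        intro x hx
        simp only [List.mem_map] at hx
        obtain ⟨b', hb', he⟩ := hx
        rw [← he]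
        exact inv a ha b' (List.mem_cons_of_mem _ hb')
      rw [hsub]
      apply ih (a :: seen) s
      intro v hv b hb
      rcases List.mem_cons.mp hv with h | h
      · exact h ▸ inv a ha b (List.mem_cons_of_mem _ hb)
      · exact inv v h b (List.mem_cons_of_mem _ hb)
    · rw [if_neg ha, List.map_append, pv_map_fst_wrow,
        PySem.Set.update_append, PySem.Set.update_append]
      apply ih (a :: seen) (PySem.Set.update s (t.map (fun b => (a, b))))
      intro v hv b hb
      rw [PySem.Set.mem_update]
      rcases List.mem_cons.mp hv with h | h
      · subst h; right; exact List.mem_map_of_mem hb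
      · left; exact inv v h b (List.mem_cons_of_mem _ hb)

theorem pv_count_map_pair (t : List Int) (d a b : Int) :
    (t.map (fun x => (d, x))).count (a, b) = if d = a then t.count b else 0 := by
  induction t with
  | nil => simp
  | cons x t ih =>
    simp only [List.map_cons, List.count_cons, ih, Prod.mk.injEq]
    by_cases hd : d = a <;> by_cases hx : x = b <;>
      simp [hd, hx, beq_iff_eq] <;> omega

theorem pv_pcount_nil (a b : Int) : pvPcount a b [] = 0 := rfl

theorem pv_pcount_cons (a b d : Int) (t : List Int) :
    pvPcount a b (d :: t) = (if d = a then (t.count b : Int) else 0) + pvPcount a b t := by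
  simp only [pvPcount, show pvPairs (d :: t) = t.map (fun x => (d, x)) ++ pvPairs t from rfl,
    List.count_append, pv_count_map_pair]
  by_cases hd : d = a <;> simp [hd] <;> push_cast <;> ring

theorem pv_ws (t : List Int) (a b : Int) : ∀ c : Int,
    pvWsum (a, b) (pvWRow a c t) = c * (t.count b : Int) + pvPcount a b t := by
  induction t with
  | nil => intro c; simp [pvWRow, pv_wsum_nil, pv_pcount_nil]
  | cons d t ih =>
    intro c
    rw [show pvWRow a c (d :: t) = ((a, d), c) :: pvWRow a (if d == a then c + 1 else c) t from rfl,
      pv_wsum_cons, ih, pv_pcount_cons, List.count_cons]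
    simp only [beq_iff_eq, Prod.mk.injEq, true_and]
    split_ifs <;> subst_vars <;> push_cast <;> ring

theorem pv_ws0 (t : List Int) (a b d c : Int) (hda : d ≠ a) :
    pvWsum (a, b) (pvWRow d c t) = 0 := by
  induction t generalizing c with
  | nil => rfl
  | cons x t ih =>
    rw [show pvWRow d c (x :: t) = ((d, x), c) :: pvWRow d (if x == d then c + 1 else c) t from rfl,
      pv_wsum_cons, ih]
    simp [Prod.ext_iff, hda]

theorem pv_val_gen (l : List Int) (a b : Int) : ∀ seen : List Int,
    pvWsum (a, b) (pvGwk seen l) = if a ∈ seen then 0 else pvPcount a b l := by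
  induction l with
  | nil => intro seen; simp [pvGwk, pv_wsum_nil, pv_pcount_nil]
  | cons d t ih =>
    intro seen
    rw [show pvGwk seen (d :: t) = (if d ∈ seen then [] else pvWRow d 1 t) ++ pvGwk (d :: seen) t from rfl,
      pv_wsum_append, ih (d :: seen), pv_pcount_cons]
    by_cases had : a = d
    · subst had
      have hmem : a ∈ a :: seen := List.mem_cons_self
      rw [if_pos hmem, if_pos rfl]
      by_cases hd : a ∈ seen
      · rw [if_pos hd, if_pos hd, pv_wsum_nil]; ring
      · rw [if_neg hd, if_neg hd, pv_ws t a b 1]; ring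
    · have hdne : ¬ d = a := fun h => had h.symm
      have hmem : (a ∈ d :: seen) ↔ (a ∈ seen) := by simp [List.mem_cons, had]
      rw [if_neg hdne]
      by_cases hd : d ∈ seen
      · rw [if_pos hd, pv_wsum_nil, if_congr hmem rfl rfl]; ring
      · rw [if_neg hd, pv_ws0 t a b d 1 hdne, if_congr hmem rfl rfl]; ring

theorem pv_wsum_map_one (L : List (Int × Int)) (k : Int × Int) :
    pvWsum k (L.map (fun x => (x, (1 : Int)))) = (L.count k : Int) := by
  induction L with
  | nil => rfl
  | cons x L ih =>
    rw [List.map_cons, pv_wsum_cons, ih, List.count_cons]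
    by_cases hx : x = k <;> simp [hx, beq_iff_eq] <;> push_cast <;> ring


theorem pv_stepA (h : PySem.Dict (Int × Int) Int) (pair : Int × Int) :
    (if h.contains pair then h.insert pair (h.getD pair 0 + 1) else h.insert pair 1)
    = pvAdd h (pair, 1) := by
  by_cases hc : h.contains pair
  · rw [if_pos hc]; rfl
  · rw [if_neg hc]
    show h.insert pair 1 = h.insert pair (h.getD pair 0 + 1)
    have hg : h.getD pair 0 = 0 := PySem.Dict.getD_of_not_contains h 0 (by simpa using hc)
    rw [hg]
    norm_num

theorem pv_rowA (nums : List Int) (a : Int) (l : List Int) :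
    ∀ (m : Nat) (h : PySem.Dict (Int × Int) Int), nums.drop m = l →
    (PySem.List.pyRange (m : Int) (PySem.List.len nums) 1).foldl (fun h j =>
      if h.contains (a, PySem.List.pyGetD nums j 0) then
        h.insert (a, PySem.List.pyGetD nums j 0) (h.getD (a, PySem.List.pyGetD nums j 0) 0 + 1)
      else h.insert (a, PySem.List.pyGetD nums j 0) 1) h
    = (l.map (fun b => ((a, b), (1 : Int)))).foldl pvAdd h := by
  induction l with
  | nil =>
    intro m h hdrop
    have hm : nums.length ≤ m := List.drop_eq_nil_iff.mp hdrop
    rw [PySem.List.pyRange_one_eq_nil (by simp; exact_mod_cast hm)]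
    rfl
  | cons b t ih =>
    intro m h hdrop
    have hm : m < nums.length := by
      by_contra hh
      rw [List.drop_eq_nil_iff.mpr (by omega)] at hdrop
      exact (List.cons_ne_nil _ _) hdrop.symm
    have hdropt : nums.drop (m + 1) = t := by
      have := congrArg List.tail hdrop
      rwa [List.tail_drop] at this
    have hb : PySem.List.pyGetD nums (m : Int) 0 = b := by
      rw [PySem.List.pyGetD_natCast]
      have h0 : nums[m]? = some b := by
        have h1 : (nums.drop m)[0]? = some b := by rw [hdrop]; rfl
        rw [List.getElem?_drop] at h1
        simpa using h1
      simp [List.getD, h0]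
    rw [PySem.List.pyRange_one_cons (by simp; exact_mod_cast hm), List.foldl_cons]
    beta_reduce
    rw [hb, pv_stepA, List.map_cons, List.foldl_cons,
      show ((m : Int) + 1) = ((m + 1 : Nat) : Int) by push_cast; ring]
    exact ih (m + 1) _ hdropt

theorem pv_loopA (nums : List Int) (l : List Int) :
    ∀ (m : Nat) (h : PySem.Dict (Int × Int) Int), nums.drop m = l →
    (PySem.List.pyRange (m : Int) (PySem.List.len nums) 1).foldl (fun h i =>
      (PySem.List.pyRange (i + 1) (PySem.List.len nums) 1).foldl (fun h j =>
        if h.contains (PySem.List.pyGetD nums i 0, PySem.List.pyGetD nums j 0) then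
          h.insert (PySem.List.pyGetD nums i 0, PySem.List.pyGetD nums j 0)
            (h.getD (PySem.List.pyGetD nums i 0, PySem.List.pyGetD nums j 0) 0 + 1)
        else h.insert (PySem.List.pyGetD nums i 0, PySem.List.pyGetD nums j 0) 1) h) h
    = ((pvPairs l).map (fun k => (k, (1 : Int)))).foldl pvAdd h := by
  induction l with
  | nil =>
    intro m h hdrop
    have hm : nums.length ≤ m := List.drop_eq_nil_iff.mp hdrop
    rw [PySem.List.pyRange_one_eq_nil (by simp; exact_mod_cast hm)]
    rfl
  | cons a t ih =>
    intro m h hdrop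
    have hm : m < nums.length := by
      by_contra hh
      rw [List.drop_eq_nil_iff.mpr (by omega)] at hdrop
      exact (List.cons_ne_nil _ _) hdrop.symm
    have hdropt : nums.drop (m + 1) = t := by
      have := congrArg List.tail hdrop
      rwa [List.tail_drop] at this
    have ha : PySem.List.pyGetD nums (m : Int) 0 = a := by
      rw [PySem.List.pyGetD_natCast]
      have h0 : nums[m]? = some a := by
        have h1 : (nums.drop m)[0]? = some a := by rw [hdrop]; rfl
        rw [List.getElem?_drop] at h1
        simpa using h1
      simp [List.getD, h0]
    rw [PySem.List.pyRange_one_cons (by simp; exact_mod_cast hm), List.foldl_cons]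
    beta_reduce
    rw [ha, show ((m : Int) + 1) = ((m + 1 : Nat) : Int) by push_cast; ring,
      pv_rowA nums a t (m + 1) h hdropt]
    rw [show pvPairs (a :: t) = t.map (fun b => (a, b)) ++ pvPairs t from rfl,
      List.map_append, List.foldl_append]
    have hrow : (t.map (fun b => (a, b))).map (fun k => (k, (1 : Int)))
        = t.map (fun b => ((a, b), (1 : Int))) := by
      simp [List.map_map, Function.comp_def]
    rw [hrow]
    exact ih (m + 1) _ hdropt

theorem pv_dictA (nums : List Int) :
    (PySem.List.pyRange 0 (PySem.List.len nums) 1).foldl (fun h i =>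
      (PySem.List.pyRange (i + 1) (PySem.List.len nums) 1).foldl (fun h j =>
        let pair := (PySem.List.pyGetD nums i 0, PySem.List.pyGetD nums j 0)
        if h.contains pair then h.insert pair (h.getD pair 0 + 1)
        else h.insert pair 1) h) PySem.Dict.empty
    = ((pvPairs nums).map (fun k => (k, (1 : Int)))).foldl pvAdd PySem.Dict.empty := by
  have := pv_loopA nums nums 0 PySem.Dict.empty rfl
  simpa using this


theorem pv_firsts_congr (l : List Int) : ∀ (s s' : List Int) (m : Nat),
    (∀ x : Int, x ∈ s ↔ x ∈ s') → pvFirsts s m l = pvFirsts s' m l := by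
  induction l with
  | nil => intro s s' m _; rfl
  | cons a t ih =>
    intro s s' m hss
    simp only [pvFirsts]
    by_cases ha : a ∈ s
    · rw [if_pos ha, if_pos ((hss a).mp ha)]
      exact ih s s' (m + 1) hss
    · rw [if_neg ha, if_neg (fun hh => ha ((hss a).mpr hh))]
      congr 1
      refine ih (a :: s) (a :: s') (m + 1) ?_
      intro x
      simp only [List.mem_cons]
      exact or_congr Iff.rfl (hss x)

theorem pv_firstloop (nums : List Int) (l : List Int) :
    ∀ (m : Nat) (f : PySem.Dict Int Int), nums.drop m = l →
    ((PySem.List.pyRange (m : Int) (PySem.List.len nums) 1).foldl (fun f idx =>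
      if f.contains (PySem.List.pyGetD nums idx 0) then f
      else f.insert (PySem.List.pyGetD nums idx 0) idx) f).items
    = f.items ++ pvFirsts f.keys m l := by
  induction l with
  | nil =>
    intro m f hdrop
    have hm : nums.length ≤ m := List.drop_eq_nil_iff.mp hdrop
    rw [PySem.List.pyRange_one_eq_nil (by simp; exact_mod_cast hm)]
    simp [pvFirsts]
  | cons a t ih =>
    intro m f hdrop
    have hm : m < nums.length := by
      by_contra hh
      rw [List.drop_eq_nil_iff.mpr (by omega)] at hdrop
      exact (List.cons_ne_nil _ _) hdrop.symm
    have hdropt : nums.drop (m + 1) = t := by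
      have := congrArg List.tail hdrop
      rwa [List.tail_drop] at this
    have ha : PySem.List.pyGetD nums (m : Int) 0 = a := by
      rw [PySem.List.pyGetD_natCast]
      have h0 : nums[m]? = some a := by
        have h1 : (nums.drop m)[0]? = some a := by rw [hdrop]; rfl
        rw [List.getElem?_drop] at h1
        simpa using h1
      simp [List.getD, h0]
    rw [PySem.List.pyRange_one_cons (by simp; exact_mod_cast hm), List.foldl_cons]
    beta_reduce
    rw [ha, show ((m : Int) + 1) = ((m + 1 : Nat) : Int) by push_cast; ring]
    simp only [pvFirsts]
    by_cases hc : f.contains a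
    · have hmem : a ∈ f.keys := (PySem.Dict.contains_iff_mem_keys f a).mp hc
      rw [if_pos hc, if_pos hmem]
      exact ih (m + 1) f hdropt
    · have hnc : f.contains a = false := by simpa using hc
      have hmem : a ∉ f.keys := fun hh => hc ((PySem.Dict.contains_iff_mem_keys f a).mpr hh)
      rw [if_neg hc, if_neg hmem, ih (m + 1) (f.insert a (m : Int)) hdropt,
        PySem.Dict.items_insert_of_not_contains f ((m : Nat) : Int) hnc,
        PySem.Dict.keys_insert_of_not_contains f ((m : Nat) : Int) hnc,
        pv_firsts_congr t (f.keys ++ [a]) (a :: f.keys) (m + 1)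
          (by intro x; simp [List.mem_cons, List.mem_append, or_comm])]
      simp [List.append_assoc]

theorem pv_innerB (a : Int) (ds : List Int) :
    ∀ (c : Int) (h : PySem.Dict (Int × Int) Int),
    ds.foldl (fun (s : PySem.Dict (Int × Int) Int × Int) b =>
      (s.1.insert (a, b) (s.1.getD (a, b) 0 + s.2), if b == a then s.2 + 1 else s.2)) (h, c)
    = ((pvWRow a c ds).foldl pvAdd h, c + (ds.count a : Int)) := by
  induction ds with
  | nil => intro c h; simp [pvWRow]
  | cons b t ih =>
    intro c h
    simp only [List.foldl_cons]
    rw [ih]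
    rw [show pvWRow a c (b :: t) = ((a, b), c) :: pvWRow a (if b == a then c + 1 else c) t from rfl,
      List.foldl_cons]
    rw [show pvAdd h ((a, b), c) = h.insert (a, b) (h.getD (a, b) 0 + c) from rfl]
    by_cases hb : b = a <;>
      simp [hb, List.count_cons] <;> push_cast <;> ring

theorem pv_loopB (nums : List Int) (l : List Int) :
    ∀ (seen : List Int) (m : Nat) (h : PySem.Dict (Int × Int) Int), nums.drop m = l →
    (pvFirsts seen m l).foldl (fun h p =>
      ((PySem.List.pyRange (p.2 + 1) (PySem.List.len nums) 1).foldl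
        (fun (s : PySem.Dict (Int × Int) Int × Int) j =>
          (s.1.insert (p.1, PySem.List.pyGetD nums j 0)
            (s.1.getD (p.1, PySem.List.pyGetD nums j 0) 0 + s.2),
           if PySem.List.pyGetD nums j 0 == p.1 then s.2 + 1 else s.2)) (h, 1)).1) h
    = (pvGwk seen l).foldl pvAdd h := by
  induction l with
  | nil => intro seen m h _; rfl
  | cons a t ih =>
    intro seen m h hdrop
    have hm : m < nums.length := by
      by_contra hh
      rw [List.drop_eq_nil_iff.mpr (by omega)] at hdrop
      exact (List.cons_ne_nil _ _) hdrop.symm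
    have hdropt : nums.drop (m + 1) = t := by
      have := congrArg List.tail hdrop
      rwa [List.tail_drop] at this
    simp only [pvFirsts, pvGwk]
    by_cases ha : a ∈ seen
    · rw [if_pos ha, if_pos ha, List.nil_append,
        pv_firsts_congr t seen (a :: seen) (m + 1)
          (by intro x; simp only [List.mem_cons]; exact ⟨Or.inr, fun hh => hh.elim (fun he => he ▸ ha) id⟩)]
      exact ih (a :: seen) (m + 1) h hdropt
    · rw [if_neg ha, if_neg ha, List.foldl_cons]
      beta_reduce
      rw [show ((m : Int) + 1) = ((m + 1 : Nat) : Int) by push_cast; ring]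
      rw [PySem.List.foldl_pyRange_pyGetD (xs := nums) (d := 0)
        (f := fun (s : PySem.Dict (Int × Int) Int × Int) b =>
          (s.1.insert (a, b) (s.1.getD (a, b) 0 + s.2), if b == a then s.2 + 1 else s.2))
        (init := (h, 1)) (by positivity)]
      rw [show (((m + 1 : Nat) : Int)).toNat = m + 1 from by simp, hdropt, pv_innerB a t 1 h]
      rw [List.foldl_append]
      exact ih (a :: seen) (m + 1) ((pvWRow a 1 t).foldl pvAdd h) hdropt

theorem pv_dictB (nums : List Int) :
    ((PySem.List.pyRange 0 (PySem.List.len nums) 1).foldl (fun f idx =>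
      if f.contains (PySem.List.pyGetD nums idx 0) then f
      else f.insert (PySem.List.pyGetD nums idx 0) idx) PySem.Dict.empty).items.foldl (fun h p =>
      ((PySem.List.pyRange (p.2 + 1) (PySem.List.len nums) 1).foldl
        (fun (s : PySem.Dict (Int × Int) Int × Int) j =>
          let b := PySem.List.pyGetD nums j 0
          let key := (p.1, b)
          (s.1.insert key (s.1.getD key 0 + s.2), if b == p.1 then s.2 + 1 else s.2))
        (h, 1)).1) PySem.Dict.empty
    = (pvGwk [] nums).foldl pvAdd PySem.Dict.empty := by
  have h1 := pv_firstloop nums nums 0 PySem.Dict.empty rfl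
  have h2 := pv_loopB nums nums [] 0 PySem.Dict.empty rfl
  simp only [PySem.Dict.keys_empty] at h1
  simp only [Nat.cast_zero] at h1 h2
  rw [show ((PySem.List.pyRange 0 (PySem.List.len nums) 1).foldl (fun f idx =>
      if f.contains (PySem.List.pyGetD nums idx 0) then f
      else f.insert (PySem.List.pyGetD nums idx 0) idx) PySem.Dict.empty).items
      = pvFirsts [] 0 nums from by simpa using h1]
  simpa using h2

theorem pv_final (nums : List Int) :
    ((pvPairs nums).map (fun k => (k, (1 : Int)))).foldl pvAdd PySem.Dict.empty
    = (pvGwk [] nums).foldl pvAdd PySem.Dict.empty := by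
  apply PySem.Dict.ext
  have ndA := pv_nodup_fold ((pvPairs nums).map (fun k => (k, (1 : Int)))) PySem.Dict.empty (by simp [PySem.Dict.nodup_keys_empty])
  have ndB := pv_nodup_fold (pvGwk [] nums) PySem.Dict.empty (by simp [PySem.Dict.nodup_keys_empty])
  have hkeys : ((pvPairs nums).map (fun k => (k, (1 : Int))) |>.foldl pvAdd PySem.Dict.empty).keys
      = ((pvGwk [] nums).foldl pvAdd PySem.Dict.empty).keys := by
    have h1 : ((pvPairs nums).map (fun k => (k, (1 : Int)))).map (·.1) = pvPairs nums := by
      simp [Function.comp_def]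
    rw [pv_keys_fold, pv_keys_fold, h1, PySem.Dict.keys_empty]
    exact pv_keys_gen nums [] [] (by simp)
  rw [PySem.Dict.items_eq_map_keys _ ndA 0, PySem.Dict.items_eq_map_keys _ ndB 0, hkeys]
  apply List.map_congr_left
  rintro ⟨a, b⟩ _
  rw [pv_getD_fold, pv_getD_fold, PySem.Dict.getD_empty, pv_wsum_map_one, pv_val_gen]
  simp [pvPcount]

-- ===== VERDICT (by name: the statement is the Claim_ definition above) =====
theorem create_histogram_spec : Claim_equal_create_histogram := by
  intro nums _
  show _ = _
  unfold create_histogram create_histogram_alt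
  simp only [pv_dictA, pv_dictB, pv_final]
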